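-- pv_equiv track=rewrite | github.com/LilianDenzler/Metrics_TCR_dynamics | pipelines/metrics_for_outputs/global_analysis_best_metric_all_tcr_space.py | _strict_common_keys
-- ===== SOURCE A (Python) =====
-- from typing import Any, Dict, List, Optional, Sequence, Tuple
--
-- def _strict_common_keys(maps: List[Dict[Tuple[str, int, str, str], int]]) -> List[Tuple[str, int, str, str]]:
--     """
--     Strict intersection across all maps. Returns sorted list of keys.
--     """
--     if not maps:
--         return []
--     common = set(maps[0].keys())
--     for m in maps[1:]:
--         common &= set(m.keys())
--     keys = sorted(common, key=lambda x: (x[0], x[1], x[2], x[3]))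
--     return keys
-- ===== SOURCE B (Python) =====
-- def _strict_common_keys(maps):
--     """
--     Strict intersection across all maps, by counting: each dict has unique keys,
--     so a key lies in every map iff its total occurrence count equals len(maps).
--     """
--     n = len(maps)
--     cnt = {}
--     for m in maps:
--         for k in m.keys():
--             cnt[k] = cnt.get(k, 0) + 1
--     return sorted(k for k, c in cnt.items() if c == n)
-- ===== Notes on version B (the rewrite author's own statement) =====
-- stated objective: alternative
-- what changed: Replaces the iterative set-intersection (set of first map, then '&=' with each following map) by a single counting pass: one dict counts every key's occurrences across all maps and the keys whose count equals len(maps) are collected and sorted; the empty-maps case falls out of the empty counter instead of an early return.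
import Mathlib
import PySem

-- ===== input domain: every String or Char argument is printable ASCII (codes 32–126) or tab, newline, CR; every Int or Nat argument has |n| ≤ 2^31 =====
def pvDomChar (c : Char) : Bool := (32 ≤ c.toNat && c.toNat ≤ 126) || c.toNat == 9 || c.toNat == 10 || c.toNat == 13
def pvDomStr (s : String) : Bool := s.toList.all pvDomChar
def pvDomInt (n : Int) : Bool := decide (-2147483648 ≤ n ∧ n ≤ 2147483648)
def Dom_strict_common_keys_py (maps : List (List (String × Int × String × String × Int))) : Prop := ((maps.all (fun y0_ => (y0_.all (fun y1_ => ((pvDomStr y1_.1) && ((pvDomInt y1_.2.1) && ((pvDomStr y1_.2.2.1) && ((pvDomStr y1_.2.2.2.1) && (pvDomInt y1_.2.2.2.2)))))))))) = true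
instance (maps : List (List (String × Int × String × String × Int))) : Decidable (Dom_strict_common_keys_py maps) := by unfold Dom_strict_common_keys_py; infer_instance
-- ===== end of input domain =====

-- B replaces A's iterative set-intersection by a single counting pass (key common to all maps
-- iff its occurrence count across maps equals the number of maps); alternative decomposition, same cost.


-- shared helpers: key of one dict entry, and the Python tuple (lexicographic) sort key
def pvKeyOf (e : String × Int × String × String × Int) : String × Int × String × String :=
  (e.1, e.2.1, e.2.2.1, e.2.2.2.1)

-- Python compares 4-tuples lexicographically; Mathlib's order on plain products is pointwise,
-- so both ports sort through the lexicographic product order (exact for Python tuple sorting).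
def pvLexKey (x : String × Int × String × String) : String ×ₗ (Int ×ₗ (String ×ₗ String)) :=
  toLex (x.1, toLex (x.2.1, toLex (x.2.2.1, x.2.2.2)))

-- ===== PORT A =====
-- m.keys() of a Python dict: the distinct keys in first-occurrence order = PySem.Set.ofList (m.map pvKeyOf)
def strict_common_keys_py (maps : List (List (String × Int × String × String × Int))) : List (String × Int × String × String) :=
  match maps with
  | [] => []
  | m0 :: rest =>
      let common :=
        rest.foldl (fun c m => PySem.Set.inter c (PySem.Set.ofList (m.map pvKeyOf)))
          (PySem.Set.ofList (m0.map pvKeyOf))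
      PySem.List.sorted common pvLexKey false

-- ===== PORT B =====
def strict_common_keys_py_alt (maps : List (List (String × Int × String × String × Int))) : List (String × Int × String × String) :=
  let n : Int := maps.length
  let cnt : PySem.Dict (String × Int × String × String) Int :=
    maps.foldl
      (fun d m => (PySem.Set.ofList (m.map pvKeyOf)).foldl (fun d k => d.modify k 0 (· + 1)) d)
      PySem.Dict.empty
  PySem.List.sorted ((cnt.items.filter (fun p => p.2 == n)).map Prod.fst) pvLexKey false

-- ===== PRECONDITION & SPEC =====
def Spec_strict_common_keys_py (maps : List (List (String × Int × String × String × Int))) (out : List (String × Int × String × String)) : Prop := out = strict_common_keys_py_alt maps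
instance (maps : List (List (String × Int × String × String × Int))) (out : List (String × Int × String × String)) : Decidable (Spec_strict_common_keys_py maps out) := by unfold Spec_strict_common_keys_py; infer_instance

-- ===== CLAIM (what is proved, stated in full; the proofs are below) =====
def Claim_equal_strict_common_keys_py : Prop := ∀ (maps : List (List (String × Int × String × String × Int))), Dom_strict_common_keys_py maps → Spec_strict_common_keys_py maps (strict_common_keys_py maps)

-- ===== LEMMAS AND PROOFS =====

-- the key list of one map, as a set
def pvKm (m : List (String × Int × String × String × Int)) : List (String × Int × String × String) :=
  PySem.Set.ofList (m.map pvKeyOf)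

theorem pvKm_nodup (m : List (String × Int × String × String × Int)) : (pvKm m).Nodup :=
  PySem.Set.nodup_ofList _

theorem count_of_nodup {α : Type} [BEq α] [LawfulBEq α] (s : List α) (h : s.Nodup) (x : α) :
    s.count x = if x ∈ s then 1 else 0 := by
  induction s with
  | nil => simp
  | cons a t ih =>
      simp only [List.nodup_cons] at h
      rcases h with ⟨ha, ht⟩
      by_cases hx : x = a
      · subst hx
        simp [ih ht, ha]
      · simp [hx, ih ht, Ne.symm hx]

theorem count_flatMap_km (maps : List (List (String × Int × String × String × Int)))
    (x : String × Int × String × String) :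
    (maps.flatMap pvKm).count x = (maps.filter (fun m => decide (x ∈ pvKm m))).length := by
  induction maps with
  | nil => simp
  | cons m t ih =>
      rw [List.flatMap_cons, List.count_append, ih, List.filter_cons]
      rw [count_of_nodup (pvKm m) (pvKm_nodup m) x]
      by_cases hx : x ∈ pvKm m
      · simp [hx]; omega
      · simp [hx]

theorem foldl_inter_spec (rest : List (List (String × Int × String × String × Int)))
    (acc : List (String × Int × String × String)) (hacc : acc.Nodup) :
    (rest.foldl (fun c m => PySem.Set.inter c (PySem.Set.ofList (m.map pvKeyOf))) acc).Nodup ∧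
    (∀ x, x ∈ rest.foldl (fun c m => PySem.Set.inter c (PySem.Set.ofList (m.map pvKeyOf))) acc ↔
      x ∈ acc ∧ ∀ m ∈ rest, x ∈ pvKm m) := by
  induction rest generalizing acc with
  | nil => simpa using hacc
  | cons m t ih =>
      have hstep : (PySem.Set.inter acc (PySem.Set.ofList (m.map pvKeyOf))).Nodup :=
        PySem.Set.nodup_inter _ _ hacc
      obtain ⟨h1, h2⟩ := ih _ hstep
      refine ⟨h1, fun x => ?_⟩
      rw [List.foldl_cons, h2 x, PySem.Set.mem_inter]
      unfold pvKm
      constructor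
      · rintro ⟨⟨hx, hm⟩, hall⟩
        refine ⟨hx, fun m' hm' => ?_⟩
        rcases List.mem_cons.mp hm' with rfl | h
        · exact hm
        · exact hall m' h
      · rintro ⟨hx, hall⟩
        exact ⟨⟨hx, hall m (by simp)⟩, fun m' hm' => hall m' (by simp [hm'])⟩

-- B's dict is Counter(all keys); its kept key list is the filter of the deduped key pool
theorem alt_list_eq (maps : List (List (String × Int × String × String × Int))) :
    ((maps.foldl
        (fun d m => (PySem.Set.ofList (m.map pvKeyOf)).foldl (fun d k => d.modify k 0 (· + 1)) d)
        PySem.Dict.empty).items.filter (fun p => p.2 == (maps.length : Int))).map Prod.fst =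
    (PySem.Set.ofList (maps.flatMap pvKm)).filter
      (fun k => ((maps.flatMap pvKm).count k : Int) == (maps.length : Int)) := by
  have hfold : maps.foldl
      (fun d m => (PySem.Set.ofList (m.map pvKeyOf)).foldl (fun d k => d.modify k 0 (· + 1)) d)
      PySem.Dict.empty = PySem.Dict.counter (maps.flatMap pvKm) := by
    rw [PySem.Dict.counter_eq_foldl, List.foldl_flatMap]
    rfl
  rw [hfold, PySem.Dict.items_counter, List.filter_map, List.map_map]
  simp [Function.comp_def]

theorem pvLexKey_injective : Function.Injective pvLexKey := by
  intro a b h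
  unfold pvLexKey at h
  have h' := congrArg ofLex h
  simp only [ofLex_toLex, Prod.mk.injEq] at h'
  obtain ⟨h1, h2⟩ := h'
  have h2' := congrArg ofLex h2
  simp only [ofLex_toLex, Prod.mk.injEq] at h2'
  obtain ⟨h3, h4⟩ := h2'
  have h4' := congrArg ofLex h4
  simp only [ofLex_toLex, Prod.mk.injEq] at h4'
  obtain ⟨h5, h6⟩ := h4'
  exact Prod.ext h1 (Prod.ext h3 (Prod.ext h5 h6))

-- ===== VERDICT (by name: the statement is the Claim_ definition above) =====
theorem strict_common_keys_py_spec : Claim_equal_strict_common_keys_py := by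
  intro maps _
  unfold Spec_strict_common_keys_py
  match maps with
  | [] => rfl
  | m0 :: rest =>
      show PySem.List.sorted _ pvLexKey false = PySem.List.sorted _ pvLexKey false
      rw [alt_list_eq]
      apply PySem.List.sorted_eq_sorted_of_perm _ _ _ pvLexKey_injective
      obtain ⟨hnd, hmem⟩ := foldl_inter_spec rest (pvKm m0) (pvKm_nodup m0)
      have hndB : ((PySem.Set.ofList ((m0 :: rest).flatMap pvKm)).filter
          (fun k => (((m0 :: rest).flatMap pvKm).count k : Int) == ((m0 :: rest).length : Int))).Nodup :=
        (PySem.Set.nodup_ofList _).filter _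
      apply (List.perm_ext_iff_of_nodup hnd hndB).mpr
      intro x
      rw [hmem x, List.mem_filter, PySem.Set.mem_ofList]
      have hcnt := count_flatMap_km (m0 :: rest) x
      constructor
      · rintro ⟨h0, hall⟩
        have hfe : (m0 :: rest).filter (fun m => decide (x ∈ pvKm m)) = m0 :: rest := by
          rw [List.filter_eq_self]
          intro m hm
          rcases List.mem_cons.mp hm with rfl | hm'
          · simpa using h0
          · simpa using hall m hm'
        refine ⟨List.mem_flatMap.mpr ⟨m0, by simp, h0⟩, ?_⟩
        rw [hcnt, hfe]
        simp
      · rintro ⟨hx, hc⟩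
        rw [hcnt] at hc
        have hlen : ((m0 :: rest).filter (fun m => decide (x ∈ pvKm m))).length = (m0 :: rest).length := by
          simp only [List.length_cons]
          simp at hc
          omega
        have hall : ∀ m ∈ (m0 :: rest), x ∈ pvKm m := by
          intro m hm
          have := (List.length_filter_eq_length_iff).mp hlen m hm
          simpa using this
        exact ⟨hall m0 (by simp), fun m hm => hall m (by simp [hm])⟩
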